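-- pv_equiv track=rewrite | github.com/doddahulugappa/DataStructure | BobsSled.py | task2_find_best_start_point
-- ===== SOURCE A (Python) =====
-- def task2_find_best_start_point(list1):
--     furthest_distance = {}
--     for i in range(1, len(list1)):
--         start_point = i
--         copy_start_point = i
--         left = list1[:start_point]
--         right = list1[start_point:]
--         l_dist = 0
--         r_dist = 0
--         for k in reversed(left):
--             if k < list1[start_point]:
--                 start_point -= 1
--                 l_dist += 1
--             else:
--                 break
--         start_point = copy_start_point
--         for j in right[1:]:
--             if j < list1[start_point]:
--                 start_point += 1
--                 r_dist += 1
--             else: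
--                 break
--         max_distance = max([l_dist, r_dist])
--         furthest_distance[start_point] = max_distance
--     max_value = max(furthest_distance.values())
--     filtered_dict = {key: value for key, value in furthest_distance.items() if value == max_value}
--     return min(filtered_dict.keys())
-- ===== SOURCE B (Python) =====
-- def task2_find_best_start_point(list1):
--     n = len(list1)
--     # decreasing-run-to-the-right lengths, built back-to-front
--     rev = [0]
--     for i in range(n - 2, -1, -1):
--         rev.append(rev[-1] + 1 if list1[i + 1] < list1[i] else 0)
--     dec = rev[::-1]
--     best = {}
--     up = 0  # increasing-run-to-the-left length, maintained incrementally
--     for i in range(1, n):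
--         up = up + 1 if list1[i - 1] < list1[i] else 0
--         d = dec[i]
--         best[i + d] = max(up, d)
--     max_value = max(best.values())
--     return min(k for k, v in best.items() if v == max_value)
-- ===== Notes on version B (the rewrite author's own statement) =====
-- stated objective: faster
-- what changed: Replaces the per-start-point left/right rescans (quadratic) by two linear passes: a back-to-front DP array of decreasing-run lengths and a running increasing-run counter, feeding the same insertion-ordered dict.
import Mathlib
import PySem

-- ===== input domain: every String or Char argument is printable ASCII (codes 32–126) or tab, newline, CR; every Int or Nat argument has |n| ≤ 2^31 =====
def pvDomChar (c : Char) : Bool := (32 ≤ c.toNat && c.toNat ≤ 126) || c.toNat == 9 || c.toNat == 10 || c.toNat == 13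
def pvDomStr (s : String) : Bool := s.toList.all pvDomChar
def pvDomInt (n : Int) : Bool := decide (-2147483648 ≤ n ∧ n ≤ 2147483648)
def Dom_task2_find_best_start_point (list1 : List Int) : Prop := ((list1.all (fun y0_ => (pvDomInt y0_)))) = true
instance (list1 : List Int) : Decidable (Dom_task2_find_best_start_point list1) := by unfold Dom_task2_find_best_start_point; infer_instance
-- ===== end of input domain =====

-- ===== PORT A =====
-- B replaces A's per-start-point quadratic rescans by two linear DP passes (measured faster).
-- A mutates nothing; equivalence is about the return value.

-- 'for k in reversed(left): if k < list1[start_point]: start_point -= 1; l_dist += 1 else: break'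
-- (returns (start_point, l_dist); list1[start_point] is provably in range on every reached state,
--  so the total pyGetD form is exact here)
def pvALeft (list1 : List Int) : List Int → Int → Int → Int × Int
  | [], sp, l => (sp, l)
  | k :: rest, sp, l =>
    if k < PySem.List.pyGetD list1 sp 0 then pvALeft list1 rest (sp - 1) (l + 1)
    else (sp, l)

-- 'for j in right[1:]: if j < list1[start_point]: start_point += 1; r_dist += 1 else: break'
def pvARight (list1 : List Int) : List Int → Int → Int → Int × Int
  | [], sp, r => (sp, r)
  | j :: rest, sp, r =>
    if j < PySem.List.pyGetD list1 sp 0 then pvARight list1 rest (sp + 1) (r + 1)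
    else (sp, r)

def task2_find_best_start_point (list1 : List Int) : Int :=
  let fd := (PySem.List.pyRange 1 (list1.length : Int) 1).foldl (fun d i =>
    let left := PySem.List.slice list1 none (some i)
    let right := PySem.List.slice list1 (some i) none
    let lres := pvALeft list1 left.reverse i 0
    let rres := pvARight list1 (PySem.List.slice right (some 1) none) i 0
    let max_distance := (PySem.List.max? [lres.2, rres.2] (fun x => x)).getD 0
    d.insert rres.1 max_distance) (PySem.Dict.empty)
  let max_value := (PySem.List.max? fd.values (fun x => x)).getD 0
  -- dict comprehension over fd.items: the keys are distinct (they come from a dict), so it is the literal dict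
  let filtered : PySem.Dict Int Int := PySem.Dict.mk (fd.items.filter (fun kv => kv.2 == max_value))
  (PySem.List.min? filtered.keys (fun x => x)).getD 0

-- ===== PORT B =====
def task2_find_best_start_point_alt (list1 : List Int) : Int :=
  let n : Int := list1.length
  -- rev = [0]; for i in range(n-2, -1, -1): rev.append(rev[-1] + 1 if list1[i+1] < list1[i] else 0)
  let rev := (PySem.List.pyRange (n - 2) (-1) (-1)).foldl (fun rev i =>
      rev ++ [if PySem.List.pyGetD list1 (i + 1) 0 < PySem.List.pyGetD list1 i 0
              then PySem.List.pyGetD rev (-1) 0 + 1 else 0]) [(0 : Int)]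
  let dec := (PySem.List.slice? rev none none (-1)).getD []   -- rev[::-1]
  let best := ((PySem.List.pyRange 1 n 1).foldl (fun (st : PySem.Dict Int Int × Int) i =>
      let up := if PySem.List.pyGetD list1 (i - 1) 0 < PySem.List.pyGetD list1 i 0
                then st.2 + 1 else 0
      let d := PySem.List.pyGetD dec i 0
      (st.1.insert (i + d) (max up d), up)) (PySem.Dict.empty, 0)).1
  let max_value := (PySem.List.max? best.values (fun x => x)).getD 0
  (PySem.List.min? ((best.items.filter (fun kv => kv.2 == max_value)).map (fun kv => kv.1))
      (fun x => x)).getD 0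

-- ===== PRECONDITION & SPEC =====
-- On lists of length < 2 the dict stays empty and Python's max of the empty value sequence raises ValueError (in both A and B).
def Pre_task2_find_best_start_point (list1 : List Int) : Prop := 2 ≤ list1.length
instance (list1 : List Int) : Decidable (Pre_task2_find_best_start_point list1) := by
  unfold Pre_task2_find_best_start_point; infer_instance

def pvWitness_task2_find_best_start_point : List Int := [3, 1, 2]

def Spec_task2_find_best_start_point (list1 : List Int) (out : Int) : Prop := out = task2_find_best_start_point_alt list1
instance (list1 : List Int) (out : Int) : Decidable (Spec_task2_find_best_start_point list1 out) := by unfold Spec_task2_find_best_start_point; infer_instance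

-- ===== CLAIM (what is proved, stated in full; the proofs are below) =====
def Claim_equal_task2_find_best_start_point : Prop := ∀ (list1 : List Int), Dom_task2_find_best_start_point list1 → Pre_task2_find_best_start_point list1 → Spec_task2_find_best_start_point list1 (task2_find_best_start_point list1)

-- ===== LEMMAS AND PROOFS =====

def pvUpV (list1 : List Int) : Nat → Int
  | 0 => 0
  | i + 1 => if list1.getD i 0 < list1.getD (i + 1) 0 then pvUpV list1 i + 1 else 0

theorem pvALeft_eq (list1 : List Int) :
    ∀ (i : Nat), i < list1.length → ∀ (acc : Int),
      (pvALeft list1 ((list1.take i).reverse) (i : Int) acc).2 = acc + pvUpV list1 i := by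
  intro i
  induction i with
  | zero => intro _ acc; simp [pvALeft, pvUpV]
  | succ i ih =>
    intro h acc
    have hi : i < list1.length := by omega
    have htake : (list1.take (i + 1)).reverse = list1[i] :: (list1.take i).reverse := by
      rw [List.take_add_one, List.getElem?_eq_getElem hi]
      simp
    have hcast : ((i + 1 : Nat) : Int) = (i : Int) + 1 := by push_cast; ring
    have hget : PySem.List.pyGetD list1 ((i : Int) + 1) 0 = list1.getD (i + 1) 0 := by
      rw [← hcast, PySem.List.pyGetD_natCast]
    have hgi : list1[i] = list1.getD i 0 := by
      rw [List.getD_eq_getElem?_getD, List.getElem?_eq_getElem hi]; rfl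
    rw [htake]
    simp only [pvALeft, hcast, hget, hgi]
    by_cases hc : list1.getD i 0 < list1.getD (i + 1) 0
    · rw [if_pos hc, show (i : Int) + 1 - 1 = (i : Int) by ring, ih hi (acc + 1)]
      simp only [pvUpV]; rw [if_pos hc]; ring
    · rw [if_neg hc]
      simp only [pvUpV]; rw [if_neg hc]; ring
def pvDecV (list1 : List Int) (i : Nat) : Int :=
  if h : i + 1 < list1.length then
    (if list1.getD (i + 1) 0 < list1.getD i 0 then pvDecV list1 (i + 1) + 1 else 0)
  else 0
termination_by list1.length - i

theorem pvARight_eq (list1 : List Int) :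
    ∀ (i : Nat), i < list1.length → ∀ (acc : Int),
      pvARight list1 (list1.drop (i + 1)) (i : Int) acc
        = ((i : Int) + pvDecV list1 i, acc + pvDecV list1 i) := by
  intro i
  induction hn : list1.length - i using Nat.strong_induction_on generalizing i with
  | _ n ih =>
    intro h acc
    have hgi : PySem.List.pyGetD list1 (i : Int) 0 = list1.getD i 0 := by
      rw [PySem.List.pyGetD_natCast]
    by_cases h1 : i + 1 < list1.length
    · have hdrop : list1.drop (i + 1) = list1[i + 1] :: list1.drop (i + 2) := by
        rw [List.drop_eq_getElem_cons h1]
      have hg1 : list1[i + 1] = list1.getD (i + 1) 0 := by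
        rw [List.getD_eq_getElem?_getD, List.getElem?_eq_getElem h1]; rfl
      rw [hdrop]
      simp only [pvARight, hgi, hg1]
      by_cases hc : list1.getD (i + 1) 0 < list1.getD i 0
      · rw [if_pos hc]
        have hc1 : ((i : Int) + 1) = ((i + 1 : Nat) : Int) := by push_cast; ring
        rw [hc1, ih (list1.length - (i + 1)) (by omega) (i + 1) rfl h1 (acc + 1)]
        have hdec : pvDecV list1 i = pvDecV list1 (i + 1) + 1 := by
          rw [pvDecV, dif_pos h1, if_pos hc]
        rw [hdec]
        rw [Prod.mk.injEq]
        refine ⟨by push_cast; ring, by ring⟩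
      · have hdec : pvDecV list1 i = 0 := by rw [pvDecV, dif_pos h1, if_neg hc]
        rw [if_neg hc, hdec]
        simp
    · have hdrop : list1.drop (i + 1) = [] := by
        rw [List.drop_eq_nil_iff]; omega
      rw [hdrop, pvDecV, dif_neg h1]
      simp [pvARight]
def pvStep (list1 : List Int) (rev : List Int) (i : Int) : List Int :=
  rev ++ [if PySem.List.pyGetD list1 (i + 1) 0 < PySem.List.pyGetD list1 i 0
          then PySem.List.pyGetD rev (-1) 0 + 1 else 0]

def pvRevState (list1 : List Int) (j : Nat) : List Int :=
  ((List.range' j (list1.length - j)).map (pvDecV list1)).reverse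

theorem pvStep_eq (list1 : List Int) (i : Nat) (h1 : i + 1 < list1.length) :
    pvStep list1 (pvRevState list1 (i + 1)) (i : Int) = pvRevState list1 i := by
  have hr1 : List.range' (i + 1) (list1.length - (i + 1)) = (i + 1) :: List.range' (i + 2) (list1.length - (i + 2)) := by
    rw [show list1.length - (i + 1) = (list1.length - (i + 2)) + 1 by omega, List.range'_succ]
  have hstate : pvRevState list1 (i + 1)
      = ((List.range' (i + 2) (list1.length - (i + 2))).map (pvDecV list1)).reverse ++ [pvDecV list1 (i + 1)] := by
    rw [pvRevState, hr1]; simp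
  have hr0 : List.range' i (list1.length - i) = i :: List.range' (i + 1) (list1.length - (i + 1)) := by
    rw [show list1.length - i = (list1.length - (i + 1)) + 1 by omega, List.range'_succ]
  have hlast : PySem.List.pyGetD (pvRevState list1 (i + 1)) (-1) 0 = pvDecV list1 (i + 1) := by
    rw [hstate, PySem.List.pyGetD_neg_one_append_singleton]
  have hcast : ((i : Int) + 1) = ((i + 1 : Nat) : Int) := by push_cast; ring_nf
  rw [pvStep, hlast, hcast, PySem.List.pyGetD_natCast, PySem.List.pyGetD_natCast]
  have hnew : (if list1.getD (i + 1) 0 < list1.getD i 0 then pvDecV list1 (i + 1) + 1 else 0) = pvDecV list1 i := by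
    conv_rhs => rw [pvDecV, dif_pos h1]
  rw [hnew]
  conv_rhs => rw [pvRevState, hr0]
  simp [pvRevState]

theorem pvRev_fold (list1 : List Int) :
    ∀ (i : Nat), i + 1 < list1.length →
      (PySem.List.pyRange (i : Int) (-1) (-1)).foldl (pvStep list1) (pvRevState list1 (i + 1))
        = pvRevState list1 0 := by
  intro i
  induction i with
  | zero =>
    intro h
    have hr : PySem.List.pyRange ((0 : Nat) : Int) (-1) (-1) = [(0 : Int)] := by
      rw [Nat.cast_zero, PySem.List.pyRange_neg_one_cons (by norm_num),
          show (0 : Int) - 1 = -1 by ring, PySem.List.pyRange_neg_one_eq_nil (by norm_num)]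
    rw [hr]
    simp only [List.foldl_cons, List.foldl_nil]
    simpa using pvStep_eq list1 0 h
  | succ i ih =>
    intro h
    rw [show ((i + 1 : Nat) : Int) = ((i : Int) + 1) by push_cast; ring]
    rw [PySem.List.pyRange_neg_one_cons (by omega), show ((i : Int) + 1 - 1) = (i : Int) by ring]
    simp only [List.foldl_cons]
    rw [show ((i : Int) + 1) = ((i + 1 : Nat) : Int) by push_cast; ring,
        pvStep_eq list1 (i + 1) h]
    exact ih (by omega)

theorem pvRev_eq (list1 : List Int) (h2 : 2 ≤ list1.length) :
    (PySem.List.pyRange ((list1.length : Int) - 2) (-1) (-1)).foldl (pvStep list1) [(0 : Int)]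
      = ((List.range list1.length).map (pvDecV list1)).reverse := by
  have hinit : [(0 : Int)] = pvRevState list1 (list1.length - 1) := by
    rw [pvRevState, show list1.length - (list1.length - 1) = 1 by omega]
    simp [List.range'_one]
    rw [pvDecV, dif_neg (by omega)]
  have hcast : (list1.length : Int) - 2 = ((list1.length - 2 : Nat) : Int) := by push_cast [h2]; ring
  rw [hinit, hcast, show list1.length - 1 = (list1.length - 2) + 1 by omega,
      pvRev_fold list1 (list1.length - 2) (by omega)]
  rw [pvRevState, Nat.sub_zero, List.range_eq_range']
def pvStepA (list1 : List Int) (d : PySem.Dict Int Int) (i : Int) : PySem.Dict Int Int :=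
  let left := PySem.List.slice list1 none (some i)
  let right := PySem.List.slice list1 (some i) none
  let lres := pvALeft list1 left.reverse i 0
  let rres := pvARight list1 (PySem.List.slice right (some 1) none) i 0
  let max_distance := (PySem.List.max? [lres.2, rres.2] (fun x => x)).getD 0
  d.insert rres.1 max_distance

def pvStepB (list1 dec : List Int) (st : PySem.Dict Int Int × Int) (i : Int) : PySem.Dict Int Int × Int :=
  let up := if PySem.List.pyGetD list1 (i - 1) 0 < PySem.List.pyGetD list1 i 0 then st.2 + 1 else 0
  let d := PySem.List.pyGetD dec i 0
  (st.1.insert (i + d) (max up d), up)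

def pvTailA (fd : PySem.Dict Int Int) : Int :=
  let max_value := (PySem.List.max? fd.values (fun x => x)).getD 0
  let filtered : PySem.Dict Int Int := PySem.Dict.mk (fd.items.filter (fun kv => kv.2 == max_value))
  (PySem.List.min? filtered.keys (fun x => x)).getD 0

def pvTailB (best : PySem.Dict Int Int) : Int :=
  let max_value := (PySem.List.max? best.values (fun x => x)).getD 0
  (PySem.List.min? ((best.items.filter (fun kv => kv.2 == max_value)).map (fun kv => kv.1))
      (fun x => x)).getD 0

theorem pvStepA_eq (list1 : List Int) (j : Nat) (_hj1 : 1 ≤ j) (hjn : j < list1.length)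
    (d : PySem.Dict Int Int) :
    pvStepA list1 d (j : Int)
      = d.insert ((j : Int) + pvDecV list1 j) (max (pvUpV list1 j) (pvDecV list1 j)) := by
  have hleft : PySem.List.slice list1 none (some (j : Int)) = list1.take j :=
    PySem.List.slice_to_natCast list1 j
  have hright : PySem.List.slice list1 (some (j : Int)) none = list1.drop j :=
    PySem.List.slice_from_natCast list1 j
  have h01 : (0 : Int) ≤ 1 := by norm_num
  have hr1 : PySem.List.slice (list1.drop j) (some 1) none = list1.drop (j + 1) := by
    rw [PySem.List.slice_from (list1.drop j) h01]
    simp [List.drop_drop]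
  have hl := pvALeft_eq list1 j hjn 0
  have hr := pvARight_eq list1 j hjn 0
  rw [pvStepA, hleft, hright, hr1, hr]
  simp only [hl]
  rw [PySem.List.max?_id_cons]
  simp [max_comm]

theorem pvStepB_eq (list1 : List Int) (j : Nat) (_hj1 : 1 ≤ j) (hjn : j < list1.length)
    (d : PySem.Dict Int Int) :
    pvStepB list1 ((List.range list1.length).map (pvDecV list1)) (d, pvUpV list1 (j - 1)) (j : Int)
      = (d.insert ((j : Int) + pvDecV list1 j) (max (pvUpV list1 j) (pvDecV list1 j)), pvUpV list1 j) := by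
  have hprev : ((j : Int) - 1) = ((j - 1 : Nat) : Int) := by omega
  have hup : (if list1.getD (j - 1) 0 < list1.getD j 0 then pvUpV list1 (j - 1) + 1 else 0)
      = pvUpV list1 j := by
    conv_rhs => rw [show j = (j - 1) + 1 by omega, pvUpV]
    rw [show (j - 1) + 1 = j by omega]
  rw [pvStepB]
  simp only [hprev, PySem.List.pyGetD_natCast]
  rw [PySem.List.getD_map_range (pvDecV list1) list1.length j 0 hjn, hup]

theorem pvMainFold (list1 : List Int) :
    ∀ (j : Nat), 1 ≤ j → j ≤ list1.length → ∀ (d : PySem.Dict Int Int),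
      (PySem.List.pyRange (j : Int) (list1.length : Int) 1).foldl (pvStepA list1) d
        = ((PySem.List.pyRange (j : Int) (list1.length : Int) 1).foldl
            (pvStepB list1 ((List.range list1.length).map (pvDecV list1)))
            (d, pvUpV list1 (j - 1))).1 := by
  intro j
  induction hn : list1.length - j using Nat.strong_induction_on generalizing j with
  | _ n ih =>
    intro hj1 hjn d
    by_cases hlt : j < list1.length
    · rw [PySem.List.pyRange_one_cons (by exact_mod_cast hlt)]
      simp only [List.foldl_cons]
      rw [pvStepA_eq list1 j hj1 hlt d, pvStepB_eq list1 j hj1 hlt d]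
      rw [show (j : Int) + 1 = ((j + 1 : Nat) : Int) by push_cast; ring]
      rw [ih (list1.length - (j + 1)) (by omega) (j + 1) rfl (by omega) (by omega)]
      rw [show (j + 1) - 1 = j by omega]
    · have hj : j = list1.length := by omega
      rw [hj, PySem.List.pyRange_one_eq_nil (le_refl _)]
      simp
theorem pvTail_eq (fd : PySem.Dict Int Int) : pvTailA fd = pvTailB fd := by
  rw [pvTailA, pvTailB, PySem.Dict.keys_mk]

theorem pvMain_eq (list1 : List Int) (h2 : 2 ≤ list1.length) :
    task2_find_best_start_point list1 = task2_find_best_start_point_alt list1 := by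
  show pvTailA ((PySem.List.pyRange 1 (list1.length : Int) 1).foldl (pvStepA list1) PySem.Dict.empty)
    = pvTailB (((PySem.List.pyRange 1 (list1.length : Int) 1).foldl
        (pvStepB list1 ((PySem.List.slice?
            ((PySem.List.pyRange ((list1.length : Int) - 2) (-1) (-1)).foldl (pvStep list1) [(0 : Int)])
            none none (-1)).getD []))
        (PySem.Dict.empty, 0)).1)
  have hdec : ((PySem.List.slice?
      ((PySem.List.pyRange ((list1.length : Int) - 2) (-1) (-1)).foldl (pvStep list1) [(0 : Int)])
      none none (-1)).getD [])
      = (List.range list1.length).map (pvDecV list1) := by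
    rw [pvRev_eq list1 h2, PySem.List.slice?_none_none_neg_one, Option.getD_some, List.reverse_reverse]
  rw [hdec]
  have hMF := pvMainFold list1 1 (le_refl 1) (by omega) PySem.Dict.empty
  norm_num at hMF
  rw [hMF]
  exact pvTail_eq _

-- ===== VERDICT (by name: the statement is the Claim_ definition above) =====
theorem task2_find_best_start_point_spec : Claim_equal_task2_find_best_start_point := by
  intro list1 _ hpre
  unfold Spec_task2_find_best_start_point
  exact pvMain_eq list1 hpre
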